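-- pv_equiv track=rewrite | github.com/i82gaibj/Metaheuristica_P2 | KnapsackProb.py | evaluarSolucion
-- ===== SOURCE A (Python) =====
-- def evaluarSolucion(solucion, precios, pesos, pesoMax):
--     precio = 0
--     peso = 0
--     for i in range(len(solucion)):
--         precio += precios[i]*solucion[i]
--         peso += pesos[i]*solucion[i]
--
--     if peso > pesoMax:
--
--         return 0
--
--     else:
--         return precio
-- ===== SOURCE B (Python) =====
-- def evaluarSolucion(solucion, precios, pesos, pesoMax):
--     items = list(zip(precios, pesos, solucion))
--
--     def totales(lo, hi):
--         # divide and conquer: (total price, total weight) of items[lo:hi]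
--         if hi - lo == 0:
--             return (0, 0)
--         if hi - lo == 1:
--             v, w, s = items[lo]
--             return (v * s, w * s)
--         mid = (lo + hi) // 2
--         v1, w1 = totales(lo, mid)
--         v2, w2 = totales(mid, hi)
--         return (v1 + v2, w1 + w2)
--
--     precio, peso = totales(0, len(items))
--     return 0 if peso > pesoMax else precio
-- ===== Notes on version B (the rewrite author's own statement) =====
-- stated objective: alternative
-- what changed: Replaces A's linear index loop accumulating price and weight with a balanced divide-and-conquer over the zipped (price, weight, selected) triples that computes the (price, weight) totals of each half and combines them.
import Mathlib
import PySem

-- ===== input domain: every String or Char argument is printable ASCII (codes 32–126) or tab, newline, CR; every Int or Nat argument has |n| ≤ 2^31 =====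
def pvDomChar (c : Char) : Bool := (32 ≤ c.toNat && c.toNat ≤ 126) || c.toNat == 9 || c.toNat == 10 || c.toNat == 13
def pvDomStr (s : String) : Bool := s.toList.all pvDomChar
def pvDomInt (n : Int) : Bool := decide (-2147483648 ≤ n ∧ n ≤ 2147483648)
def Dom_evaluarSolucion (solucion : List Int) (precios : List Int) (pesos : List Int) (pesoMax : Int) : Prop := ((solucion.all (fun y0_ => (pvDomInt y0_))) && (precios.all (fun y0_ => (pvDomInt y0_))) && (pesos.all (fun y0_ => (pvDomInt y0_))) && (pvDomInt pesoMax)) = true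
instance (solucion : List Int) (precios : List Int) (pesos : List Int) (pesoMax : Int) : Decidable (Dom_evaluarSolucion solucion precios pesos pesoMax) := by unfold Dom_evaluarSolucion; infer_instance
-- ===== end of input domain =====

-- B replaces A's linear index loop with a balanced divide-and-conquer over the zipped
-- (price, weight, selected) triples (alternative decomposition; same O(n) cost).


-- ===== PORT A =====
-- single pass over range(len(solucion)) accumulating (precio, peso); pyGet? is exact,
-- '.getD 0' is only reached outside Pre_ (where Python raises IndexError)
def evaluarSolucion (solucion : List Int) (precios : List Int) (pesos : List Int) (pesoMax : Int) : Int :=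
  let st := (PySem.List.pyRange 0 (solucion.length : Int) 1).foldl
    (fun (s : Int × Int) i =>
      (s.1 + ((PySem.List.pyGet? precios i).getD 0) * ((PySem.List.pyGet? solucion i).getD 0),
       s.2 + ((PySem.List.pyGet? pesos i).getD 0) * ((PySem.List.pyGet? solucion i).getD 0)))
    (0, 0)
  if st.2 > pesoMax then 0 else st.1

-- ===== PORT B =====
-- divide and conquer: totalesB items lo hi = (price total, weight total) of items[lo:hi];
-- 'items[lo]' at the singleton leaf is in range on every call B makes, ported as getD
def totalesB (items : List (Int × Int × Int)) (fuel lo hi : Nat) : Int × Int :=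
  if hi - lo = 0 then (0, 0)
  else if hi - lo = 1 then
    let t := items.getD lo (0, 0, 0)
    (t.1 * t.2.2, t.2.1 * t.2.2)
  else
    match fuel with
    | 0 => (0, 0)  -- fuel is a pure termination device: callers pass fuel = hi - lo ≥ 2 here
    | fuel + 1 =>
      let mid := (lo + hi) / 2
      let p1 := totalesB items fuel lo mid
      let p2 := totalesB items fuel mid hi
      (p1.1 + p2.1, p1.2 + p2.2)

def evaluarSolucion_alt (solucion : List Int) (precios : List Int) (pesos : List Int) (pesoMax : Int) : Int :=
  let items := precios.zip (pesos.zip solucion)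
  let t := totalesB items items.length 0 items.length
  if t.2 > pesoMax then 0 else t.1

-- ===== PRECONDITION & SPEC =====
-- Pre_ excludes only inputs where Python A raises IndexError: precios or pesos shorter than solucion.
def Pre_evaluarSolucion (solucion : List Int) (precios : List Int) (pesos : List Int) (pesoMax : Int) : Prop :=
  solucion.length ≤ precios.length ∧ solucion.length ≤ pesos.length
instance (solucion : List Int) (precios : List Int) (pesos : List Int) (pesoMax : Int) : Decidable (Pre_evaluarSolucion solucion precios pesos pesoMax) := by unfold Pre_evaluarSolucion; infer_instance
def pvWitness_evaluarSolucion : List Int × List Int × List Int × Int := ([1, 0, 1], [10, 20, 30], [1, 2, 3], 5)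

def Spec_evaluarSolucion (solucion : List Int) (precios : List Int) (pesos : List Int) (pesoMax : Int) (out : Int) : Prop := out = evaluarSolucion_alt solucion precios pesos pesoMax
instance (solucion : List Int) (precios : List Int) (pesos : List Int) (pesoMax : Int) (out : Int) : Decidable (Spec_evaluarSolucion solucion precios pesos pesoMax out) := by unfold Spec_evaluarSolucion; infer_instance

-- ===== CLAIM (what is proved, stated in full; the proofs are below) =====
def Claim_equal_evaluarSolucion : Prop := ∀ (solucion : List Int) (precios : List Int) (pesos : List Int) (pesoMax : Int), Dom_evaluarSolucion solucion precios pesos pesoMax → Pre_evaluarSolucion solucion precios pesos pesoMax → Spec_evaluarSolucion solucion precios pesos pesoMax (evaluarSolucion solucion precios pesos pesoMax)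
-- ===== LEMMAS AND PROOFS =====
-- price/weight totals of a triple list
def vsum (items : List (Int × Int × Int)) : Int := (items.map (fun t => t.1 * t.2.2)).sum
def wsum (items : List (Int × Int × Int)) : Int := (items.map (fun t => t.2.1 * t.2.2)).sum

theorem vsum_append (l1 l2 : List (Int × Int × Int)) : vsum (l1 ++ l2) = vsum l1 + vsum l2 := by
  simp [vsum]

theorem wsum_append (l1 l2 : List (Int × Int × Int)) : wsum (l1 ++ l2) = wsum l1 + wsum l2 := by
  simp [wsum]

-- the divide-and-conquer helper computes the totals of the slice items[lo:hi]
theorem totalesB_eq (items : List (Int × Int × Int)) :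
    ∀ fuel lo hi : Nat, hi - lo ≤ fuel → lo ≤ hi → hi ≤ items.length →
      totalesB items fuel lo hi
        = (vsum ((items.drop lo).take (hi - lo)), wsum ((items.drop lo).take (hi - lo))) := by
  intro fuel
  induction fuel with
  | zero =>
    intro lo hi hf hle hlen
    have h0 : hi - lo = 0 := by omega
    rw [totalesB]
    simp [h0, vsum, wsum]
  | succ fuel ih =>
    intro lo hi hf hle hlen
    rw [totalesB]
    by_cases h0 : hi - lo = 0
    · simp [h0, vsum, wsum]
    · by_cases h1 : hi - lo = 1
      · have hlo : lo < items.length := by omega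
        simp only [h1]
        have htake1 : (items.drop lo).take 1 = [items[lo]] :=
          List.take_one_drop_eq_of_lt_length hlo
        simp [vsum, wsum, htake1, List.getD, List.getElem?_eq_getElem hlo]
      · simp only [h0, if_false, h1]
        set mid := (lo + hi) / 2 with hmid
        have hm1 : lo < mid := by omega
        have hm2 : mid < hi := by omega
        rw [ih lo mid (by omega) (by omega) (by omega),
            ih mid hi (by omega) (by omega) hlen]
        have hsplit : (items.drop lo).take (hi - lo)
            = (items.drop lo).take (mid - lo) ++ ((items.drop mid).take (hi - mid)) := by
          have he : hi - lo = (mid - lo) + (hi - mid) := by omega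
          rw [he, List.take_add, List.drop_drop]
          have : lo + (mid - lo) = mid := by omega
          rw [this]
        rw [hsplit, vsum_append, wsum_append]

-- a combined pair fold is the pair of the two component folds
theorem foldl_pair_split {α : Type} (l : List α) (f g : α → Int) :
    ∀ p w : Int,
      l.foldl (fun (s : Int × Int) i => (s.1 + f i, s.2 + g i)) (p, w)
        = (l.foldl (fun s i => s + f i) p, l.foldl (fun s i => s + g i) w) := by
  induction l with
  | nil => intro p w; simp
  | cons a t ih => intro p w; simpa using ih (p + f a) (w + g a)

theorem foldl_add_sum {α : Type} (l : List α) (f : α → Int) :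
    ∀ c : Int, l.foldl (fun s i => s + f i) c = c + (l.map f).sum := by
  induction l with
  | nil => intro c; simp
  | cons a t ih => intro c; simp [ih]; ring

-- the index-wise sums over range(len(solucion)) are the sums over the zipped triples
theorem range_sum_eq (solucion precios pesos : List Int)
    (hp : solucion.length ≤ precios.length) (hw : solucion.length ≤ pesos.length) :
    ((List.range solucion.length).map (fun k => precios.getD k 0 * solucion.getD k 0)).sum
        = vsum (precios.zip (pesos.zip solucion))
    ∧ ((List.range solucion.length).map (fun k => pesos.getD k 0 * solucion.getD k 0)).sum
        = wsum (precios.zip (pesos.zip solucion)) := by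
  induction solucion generalizing precios pesos with
  | nil => simp [vsum, wsum]
  | cons s ss ih =>
    match precios, pesos with
    | v :: vs, w :: ws =>
      simp only [List.length_cons, List.range_succ_eq_map, List.map_cons, List.map_map,
        List.sum_cons]
      have heq : ∀ (xs : List Int) (x : Int),
          ((List.range ss.length).map ((fun k => (x :: xs).getD k 0 * (s :: ss).getD k 0) ∘ (· + 1)))
            = (List.range ss.length).map (fun k => xs.getD k 0 * ss.getD k 0) := by
        intro xs x
        apply List.map_congr_left
        intro k _
        simp [List.getD]
      rw [heq, heq]
      obtain ⟨h1, h2⟩ := ih vs ws (by simpa using hp) (by simpa using hw)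
      rw [h1, h2]
      constructor
      · simp [vsum, List.getD]
      · simp [wsum, List.getD]

-- ===== VERDICT (by name: the statement is the Claim_ definition above) =====
theorem evaluarSolucion_spec : Claim_equal_evaluarSolucion := by
  intro solucion precios pesos pesoMax _ hpre
  obtain ⟨hp, hw⟩ := hpre
  unfold Spec_evaluarSolucion
  simp only [evaluarSolucion, evaluarSolucion_alt]
  have hlen : (precios.zip (pesos.zip solucion)).length = solucion.length := by
    simp; omega
  rw [totalesB_eq _ _ 0 _ (by omega) (by omega) (by omega)]
  simp only [List.drop_zero, Nat.sub_zero]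
  have htake : (precios.zip (pesos.zip solucion)).take ((precios.zip (pesos.zip solucion)).length)
      = precios.zip (pesos.zip solucion) := List.take_length
  rw [htake]
  rw [PySem.List.pyRange_one, List.foldl_map]
  rw [show (((solucion.length : Int)) - 0).toNat = solucion.length by simp]
  rw [foldl_pair_split, foldl_add_sum, foldl_add_sum]
  obtain ⟨h1, h2⟩ := range_sum_eq solucion precios pesos hp hw
  have harg : ∀ (xs : List Int),
      (List.range solucion.length).map (fun (i : Nat) => ((PySem.List.pyGet? xs (0 + (i : Int))).getD 0) * ((PySem.List.pyGet? solucion (0 + (i : Int))).getD 0))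
        = (List.range solucion.length).map (fun k => xs.getD k 0 * solucion.getD k 0) := by
    intro xs
    apply List.map_congr_left
    intro k _
    simp [PySem.List.pyGet?_natCast, List.getD]
  rw [harg precios, harg pesos, h1, h2]
  simp
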